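-- pv_equiv track=rewrite | github.com/sharedhosting/alias | fix_sql_complete.py | escape_sql_string_values
-- ===== SOURCE A (Python) =====
-- def escape_sql_string_values(values_text):
--     # This function will process the values part of an INSERT statement
--     # and properly escape single quotes in string values
--     result = ""
--     i = 0
--     while i < len(values_text):
--         char = values_text[i]
--
--         if char == "'":
--             # Start of a string value
--             result += char
--             i += 1
--             # Process until we find the closing quote (that's not escaped)
--             while i < len(values_text):
--                 char = values_text[i]
--                 if char == "'" and (i == 0 or values_text[i-1] != '\\'):
--                     # Found end of string, but in SQLite we need to double the single quotes
--                     # So we need to go back and double any single quotes inside the string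
--                     result += char
--                     break
--                 elif char == "'":
--                     # This is a single quote inside the string, need to double it for SQLite
--                     result += "''"  # Double the single quote for SQLite
--                 else:
--                     result += char
--                 i += 1
--         else:
--             result += char
--         i += 1
--
--     return result
-- ===== SOURCE B (Python) =====
-- def escape_sql_string_values(values_text):
--     # Chunk-based rewrite: jump between quotes with str.find and fix whole
--     # string bodies with str.replace, instead of a char-by-char state machine.
--     parts = []
--     i = 0
--     while True:
--         j = values_text.find("'", i)
--         if j == -1:
--             parts.append(values_text[i:])
--             return "".join(parts)
--         parts.append(values_text[i:j + 1])          # text up to and incl. opening quote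
--         # locate the closing quote (first quote not preceded by a backslash)
--         k = j + 1
--         while True:
--             k = values_text.find("'", k)
--             if k == -1:
--                 break
--             if values_text[k - 1] != '\\':
--                 break
--             k += 1
--         if k == -1:
--             # unterminated literal: every remaining quote is escaped; double them
--             parts.append(values_text[j + 1:].replace("\\'", "\\''"))
--             return "".join(parts)
--         parts.append(values_text[j + 1:k].replace("\\'", "\\''") + "'")
--         i = k + 1
-- ===== Notes on version B (the rewrite author's own statement) =====
-- stated objective: faster
-- what changed: Replaced A's char-by-char nested while-loops that grow the result one character at a time by a chunk-based pass that jumps between quotes with str.find, copies whole slices, and doubles the escaped quotes of each string-literal body with one str.replace, joining the chunks at the end.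
import Mathlib
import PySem

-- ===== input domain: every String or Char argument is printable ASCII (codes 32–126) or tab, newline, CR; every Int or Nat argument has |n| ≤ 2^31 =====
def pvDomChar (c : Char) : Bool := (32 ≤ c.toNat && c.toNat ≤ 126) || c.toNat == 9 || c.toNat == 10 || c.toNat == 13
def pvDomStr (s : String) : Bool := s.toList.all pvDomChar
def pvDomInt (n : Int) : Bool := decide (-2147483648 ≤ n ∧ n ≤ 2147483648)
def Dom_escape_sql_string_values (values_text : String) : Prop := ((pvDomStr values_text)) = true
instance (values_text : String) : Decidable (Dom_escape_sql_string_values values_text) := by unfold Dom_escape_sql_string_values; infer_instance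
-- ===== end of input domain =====

-- B replaces A's char-by-char nested while-loops by a chunk-based pass that jumps
-- between quotes with find and fixes whole literal bodies with replace (objective: alternative).
-- Loops are ported with a structural fuel parameter (always called with enough fuel).

-- ===== PORT A =====
-- inner while loop of A: scans from index i inside a string literal, appending to result
def escSqlInner (s : List Char) (fuel i : Nat) (result : List Char) : List Char × Nat :=
  match fuel with
  | 0 => (result, i)
  | fuel + 1 =>
    if i < s.length then
      if s.getD i ' ' = '\'' ∧ (i = 0 ∨ s.getD (i - 1) ' ' ≠ '\\') then
        (result ++ [s.getD i ' '], i)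
      else if s.getD i ' ' = '\'' then
        escSqlInner s fuel (i + 1) (result ++ ['\'', '\''])
      else
        escSqlInner s fuel (i + 1) (result ++ [s.getD i ' '])
    else (result, i)

-- outer while loop of A
def escSqlOuter (s : List Char) (fuel i : Nat) (result : List Char) : List Char :=
  match fuel with
  | 0 => result
  | fuel + 1 =>
    if i < s.length then
      if s.getD i ' ' = '\'' then
        let p := escSqlInner s (s.length + 1) (i + 1) (result ++ [s.getD i ' '])
        escSqlOuter s fuel (p.2 + 1) p.1
      else
        escSqlOuter s fuel (i + 1) (result ++ [s.getD i ' '])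
    else result

def escape_sql_string_values (values_text : String) : String :=
  String.ofList (escSqlOuter values_text.toList (values_text.toList.length + 1) 0 [])

-- ===== PORT B =====
-- values_text.find("'", k)
def findQuote (s : List Char) (fuel k : Nat) : Option Nat :=
  match fuel with
  | 0 => none
  | fuel + 1 =>
    if k < s.length then
      if s.getD k ' ' = '\'' then some k else findQuote s fuel (k + 1)
    else none

-- B's inner while loop: first quote at index ≥ k not preceded by a backslash
def bFindClose (s : List Char) (fuel k : Nat) : Option Nat :=
  match fuel with
  | 0 => none
  | fuel + 1 =>
    match findQuote s (s.length + 1) k with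
    | none => none
    | some m => if s.getD (m - 1) ' ' ≠ '\\' then some m else bFindClose s fuel (m + 1)

-- body.replace("\\'", "\\''")
def bEsc (fuel : Nat) (l : List Char) : List Char :=
  match fuel with
  | 0 => l
  | fuel + 1 =>
    match l with
    | [] => []
    | [c] => [c]
    | c1 :: c2 :: rest =>
      if c1 = '\\' ∧ c2 = '\'' then '\\' :: '\'' :: '\'' :: bEsc fuel rest
      else c1 :: bEsc fuel (c2 :: rest)

-- B's outer while loop
def bMain (s : List Char) (fuel i : Nat) (parts : List Char) : List Char :=
  match fuel with
  | 0 => parts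
  | fuel + 1 =>
    match findQuote s (s.length + 1) i with
    | none => parts ++ s.drop i
    | some j =>
      match bFindClose s (s.length + 1) (j + 1) with
      | none => (parts ++ (s.drop i).take (j + 1 - i)) ++ bEsc (s.length + 1) (s.drop (j + 1))
      | some k =>
          bMain s fuel (k + 1)
            ((parts ++ (s.drop i).take (j + 1 - i)) ++
              (bEsc (s.length + 1) ((s.drop (j + 1)).take (k - (j + 1))) ++ ['\'']))

def escape_sql_string_values_alt (values_text : String) : String :=
  String.ofList (bMain values_text.toList (values_text.toList.length + 1) 0 [])

-- ===== PRECONDITION & SPEC =====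
def Spec_escape_sql_string_values (values_text : String) (out : String) : Prop := out = escape_sql_string_values_alt values_text
instance (values_text : String) (out : String) : Decidable (Spec_escape_sql_string_values values_text out) := by unfold Spec_escape_sql_string_values; infer_instance

-- ===== CLAIM (what is proved, stated in full; the proofs are below) =====
def Claim_equal_escape_sql_string_values : Prop := ∀ (values_text : String), Dom_escape_sql_string_values values_text → Spec_escape_sql_string_values values_text (escape_sql_string_values values_text)

-- ===== LEMMAS AND PROOFS =====

-- one char of A's quote-doubling inner loop, as a list function
def pvDouble (c : Char) : List Char := if c = '\'' then ['\'', '\''] else [c]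

theorem getD_drop_take (s : List Char) (a b t : Nat) (ht : t < b) (h2 : a + t < s.length) :
    ((s.drop a).take b).getD t ' ' = s.getD (a + t) ' ' := by
  simp [List.getD_eq_getElem?_getD, List.getElem?_drop, ht]

theorem slice_cons (s : List Char) (p k : Nat) (h1 : p < k) (h2 : p < s.length) :
    (s.drop p).take (k - p) = s.getD p ' ' :: (s.drop (p + 1)).take (k - (p + 1)) := by
  rw [List.drop_eq_getElem_cons h2]
  have : k - p = (k - (p + 1)) + 1 := by omega
  rw [this, List.take_succ_cons, List.getD_eq_getElem s ' ' h2]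

theorem slice_snoc (s : List Char) (i j : Nat) (h1 : i ≤ j) (h2 : j < s.length) :
    (s.drop i).take (j + 1 - i) = (s.drop i).take (j - i) ++ [s.getD j ' '] := by
  have : j + 1 - i = (j - i) + 1 := by omega
  rw [this, List.take_add_one]
  congr 1
  simp [List.getElem?_drop, List.getD_eq_getElem?_getD]
  rw [show i + (j - i) = j by omega]
  simp [List.getElem?_eq_getElem h2]

theorem take_all_drop (s : List Char) (a : Nat) : (s.drop a).take (s.length) = s.drop a := by
  apply List.take_of_length_le; simp

-- ---- findQuote ----

theorem findQuote_bounds (s : List Char) :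
    ∀ fuel k j, findQuote s fuel k = some j → k ≤ j ∧ j < s.length := by
  intro fuel
  induction fuel with
  | zero => intro k j h; simp [findQuote] at h
  | succ fuel ih =>
      intro k j h
      rw [findQuote] at h
      by_cases hk : k < s.length
      · rw [if_pos hk] at h
        by_cases hq : s.getD k ' ' = '\''
        · rw [if_pos hq] at h; injection h with h; omega
        · rw [if_neg hq] at h; have := ih (k + 1) j h; omega
      · rw [if_neg hk] at h; simp at h

theorem findQuote_none_spec (s : List Char) :
    ∀ fuel k, s.length - k ≤ fuel → findQuote s fuel k = none →
      ∀ m, k ≤ m → m < s.length → s.getD m ' ' ≠ '\'' := by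
  intro fuel
  induction fuel with
  | zero => intro k hf h m hm1 hm2; omega
  | succ fuel ih =>
      intro k hf h m hm1 hm2 hq
      rw [findQuote] at h
      have hk : k < s.length := by omega
      rw [if_pos hk] at h
      by_cases hqk : s.getD k ' ' = '\''
      · rw [if_pos hqk] at h; simp at h
      · rw [if_neg hqk] at h
        rcases Nat.eq_or_lt_of_le hm1 with rfl | hlt
        · exact hqk hq
        · exact ih (k + 1) (by omega) h m hlt hm2 hq

theorem findQuote_some_spec (s : List Char) :
    ∀ fuel k j, findQuote s fuel k = some j →
      s.getD j ' ' = '\'' ∧ ∀ m, k ≤ m → m < j → s.getD m ' ' ≠ '\'' := by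
  intro fuel
  induction fuel with
  | zero => intro k j h; simp [findQuote] at h
  | succ fuel ih =>
      intro k j h
      rw [findQuote] at h
      by_cases hk : k < s.length
      · rw [if_pos hk] at h
        by_cases hq : s.getD k ' ' = '\''
        · rw [if_pos hq] at h; injection h with h; subst h
          exact ⟨hq, fun m hm1 hm2 _ => by omega⟩
        · rw [if_neg hq] at h
          obtain ⟨h1, h2⟩ := ih (k + 1) j h
          refine ⟨h1, fun m hm1 hm2 hq' => ?_⟩
          rcases Nat.eq_or_lt_of_le hm1 with rfl | hlt
          · exact hq hq'
          · exact h2 m hlt hm2 hq'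
      · rw [if_neg hk] at h; simp at h

theorem findQuote_none_of_ge (s : List Char) (fuel i : Nat) (h : s.length ≤ i) :
    findQuote s fuel i = none := by
  cases fuel with
  | zero => rfl
  | succ fuel => rw [findQuote, if_neg (by omega)]

-- ---- bFindClose ----

theorem bFindClose_bounds (s : List Char) :
    ∀ fuel k j, bFindClose s fuel k = some j → k ≤ j ∧ j < s.length := by
  intro fuel
  induction fuel with
  | zero => intro k j h; simp [bFindClose] at h
  | succ fuel ih =>
      intro k j h
      rw [bFindClose] at h
      rcases hfq : findQuote s (s.length + 1) k with _ | m
      · rw [hfq] at h; simp at h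
      · rw [hfq] at h; dsimp only at h
        have hb := findQuote_bounds s (s.length + 1) k m hfq
        by_cases hp : s.getD (m - 1) ' ' ≠ '\\'
        · rw [if_pos hp] at h; injection h with h; omega
        · rw [if_neg hp] at h; have := ih (m + 1) j h; omega

theorem bFindClose_none_spec (s : List Char) :
    ∀ fuel k, s.length - k < fuel → bFindClose s fuel k = none →
      ∀ m, k ≤ m → m < s.length → s.getD m ' ' = '\'' → s.getD (m - 1) ' ' = '\\' := by
  intro fuel
  induction fuel with
  | zero => intro k hf; omega
  | succ fuel ih =>
      intro k hf h m' hm1 hm2 hq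
      rw [bFindClose] at h
      rcases hfq : findQuote s (s.length + 1) k with _ | m
      · exact absurd hq (findQuote_none_spec s (s.length + 1) k (by omega) hfq m' hm1 hm2)
      · rw [hfq] at h; dsimp only at h
        have hb := findQuote_bounds s (s.length + 1) k m hfq
        obtain ⟨hqm, hnone⟩ := findQuote_some_spec s (s.length + 1) k m hfq
        by_cases hp : s.getD (m - 1) ' ' ≠ '\\'
        · rw [if_pos hp] at h; simp at h
        · rw [if_neg hp] at h
          have hp' : s.getD (m - 1) ' ' = '\\' := by by_contra hc; exact hp hc
          rcases Nat.lt_trichotomy m' m with hlt | rfl | hgt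
          · exact absurd hq (hnone m' hm1 hlt)
          · exact hp'
          · exact ih (m + 1) (by omega) h m' hgt hm2 hq

theorem bFindClose_some_spec (s : List Char) :
    ∀ fuel k j, bFindClose s fuel k = some j →
      s.getD j ' ' = '\'' ∧ s.getD (j - 1) ' ' ≠ '\\' ∧
        ∀ m, k ≤ m → m < j → s.getD m ' ' = '\'' → s.getD (m - 1) ' ' = '\\' := by
  intro fuel
  induction fuel with
  | zero => intro k j h; simp [bFindClose] at h
  | succ fuel ih =>
      intro k j h
      rw [bFindClose] at h
      rcases hfq : findQuote s (s.length + 1) k with _ | m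
      · rw [hfq] at h; simp at h
      · rw [hfq] at h; dsimp only at h
        obtain ⟨hqm, hnone⟩ := findQuote_some_spec s (s.length + 1) k m hfq
        by_cases hp : s.getD (m - 1) ' ' ≠ '\\'
        · rw [if_pos hp] at h; injection h with h; subst h
          exact ⟨hqm, hp, fun m' hm1 hm2 hq => absurd hq (hnone m' hm1 hm2)⟩
        · rw [if_neg hp] at h
          have hp' : s.getD (m - 1) ' ' = '\\' := by by_contra hc; exact hp hc
          obtain ⟨h1, h2, h3⟩ := ih (m + 1) j h
          have hb := bFindClose_bounds s fuel (m + 1) j h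
          refine ⟨h1, h2, fun m' hm1 hm2 hq => ?_⟩
          rcases Nat.lt_trichotomy m' m with hlt | rfl | hgt
          · exact absurd hq (hnone m' hm1 hlt)
          · exact hp'
          · exact h3 m' hgt hm2 hq

-- ---- bEsc ----

theorem bEsc_eq_flatMap (s : List Char) :
    ∀ fuel l, l.length ≤ fuel →
      (∀ t, t < l.length → l.getD t ' ' = '\'' → 0 < t ∧ l.getD (t - 1) ' ' = '\\') →
      bEsc fuel l = l.flatMap pvDouble := by
  intro fuel
  induction fuel with
  | zero =>
      intro l hf _
      have : l = [] := by cases l <;> simp_all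
      subst this; rfl
  | succ fuel ih =>
      intro l hf h
      rcases l with _ | ⟨c1, _ | ⟨c2, rest⟩⟩
      · rfl
      · have hc : c1 ≠ '\'' := by
          intro hc; exact absurd (h 0 (by simp) (by simp [hc])).1 (by omega)
        simp [bEsc, pvDouble, hc]
      · rw [bEsc]
        by_cases hif : c1 = '\\' ∧ c2 = '\''
        · obtain ⟨rfl, rfl⟩ := hif
          rw [if_pos ⟨rfl, rfl⟩]
          have hrest : ∀ t, t < rest.length → rest.getD t ' ' = '\'' →
              0 < t ∧ rest.getD (t - 1) ' ' = '\\' := by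
            intro t ht hq
            have := h (t + 2) (by simp; omega) (by simpa using hq)
            rcases this with ⟨-, hp⟩
            rcases Nat.eq_zero_or_pos t with rfl | htp
            · simp at hp
            · refine ⟨htp, ?_⟩
              have : t + 2 - 1 = (t - 1) + 2 := by omega
              rw [this] at hp
              simpa using hp
          simp [pvDouble, ih rest (by simp at hf; omega) hrest]
        · rw [if_neg hif]
          have hc1 : c1 ≠ '\'' := by
            intro hc; exact absurd (h 0 (by simp) (by simp [hc])).1 (by omega)
          have hrest : ∀ t, t < (c2 :: rest).length → (c2 :: rest).getD t ' ' = '\'' →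
              0 < t ∧ (c2 :: rest).getD (t - 1) ' ' = '\\' := by
            intro t ht hq
            have h' := h (t + 1) (by simpa using ht) (by simpa using hq)
            rcases h' with ⟨-, hp⟩
            rcases Nat.eq_zero_or_pos t with rfl | htp
            · simp at hp hq
              exact absurd ⟨hp, hq⟩ hif
            · refine ⟨htp, ?_⟩
              have : t + 1 - 1 = (t - 1) + 1 := by omega
              rw [this] at hp
              simpa using hp
          simp [pvDouble, hc1, ih (c2 :: rest) (by simp at hf ⊢; omega) hrest]

-- the safety hypothesis of bEsc_eq_flatMap for a slice s[a:a+b] that follows an opening quote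
theorem safe_slice (s : List Char) (a b : Nat) (h1 : 1 ≤ a)
    (ha : s.getD (a - 1) ' ' = '\'')
    (hq : ∀ m, a ≤ m → m < s.length → m < a + b → s.getD m ' ' = '\'' → s.getD (m - 1) ' ' = '\\') :
    ∀ t, t < ((s.drop a).take b).length → ((s.drop a).take b).getD t ' ' = '\'' →
      0 < t ∧ ((s.drop a).take b).getD (t - 1) ' ' = '\\' := by
  intro t ht hq'
  have hlen : t < b ∧ a + t < s.length := by
    simp [List.length_take, List.length_drop] at ht; omega
  rw [getD_drop_take s a b t hlen.1 hlen.2] at hq'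
  have hp := hq (a + t) (by omega) hlen.2 (by omega) hq'
  have htp : 0 < t := by
    rcases Nat.eq_zero_or_pos t with rfl | htp
    · rw [show a + 0 - 1 = a - 1 by omega] at hp
      rw [ha] at hp; simp at hp
    · exact htp
  refine ⟨htp, ?_⟩
  rw [getD_drop_take s a b (t - 1) (by omega) (by omega)]
  rw [show a + (t - 1) = a + t - 1 by omega]
  exact hp

-- ---- A's inner loop ----

theorem escSqlInner_close (s : List Char) (k : Nat) (hk : k < s.length)
    (hkq : s.getD k ' ' = '\'') (hkp : s.getD (k - 1) ' ' ≠ '\\') :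
    ∀ fuel p, k - p < fuel → 1 ≤ p → p ≤ k →
      (∀ m, p ≤ m → m < k → s.getD m ' ' = '\'' → s.getD (m - 1) ' ' = '\\') →
      ∀ q, escSqlInner s fuel p q =
        (q ++ ((s.drop p).take (k - p)).flatMap pvDouble ++ ['\''], k) := by
  intro fuel
  induction fuel with
  | zero => intro p hf; omega
  | succ fuel ih =>
      intro p hf h1 h2 hbody q
      rcases Nat.eq_or_lt_of_le h2 with rfl | hpk
      · rw [escSqlInner, if_pos hk, if_pos ⟨hkq, Or.inr hkp⟩, hkq]
        simp
      · rw [escSqlInner, if_pos (show p < s.length by omega)]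
        by_cases hc : s.getD p ' ' = '\''
        · have hprev : s.getD (p - 1) ' ' = '\\' := hbody p le_rfl hpk hc
          rw [if_neg (by
            rintro ⟨-, h0 | hne⟩
            · omega
            · exact hne hprev)]
          rw [if_pos hc]
          rw [ih (p + 1) (by omega) (by omega) (by omega)
            (fun m hm1 hm2 => hbody m (by omega) hm2)]
          rw [slice_cons s p k hpk (by omega), List.flatMap_cons, hc]
          simp [pvDouble]
        · rw [if_neg (fun hh => hc hh.1), if_neg hc]
          rw [ih (p + 1) (by omega) (by omega) (by omega)
            (fun m hm1 hm2 => hbody m (by omega) hm2)]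
          rw [slice_cons s p k hpk (by omega), List.flatMap_cons]
          simp only [pvDouble]
          rw [if_neg hc]
          simp

theorem escSqlInner_open (s : List Char) :
    ∀ fuel p, s.length - p < fuel → 1 ≤ p → p ≤ s.length →
      (∀ m, p ≤ m → m < s.length → s.getD m ' ' = '\'' → s.getD (m - 1) ' ' = '\\') →
      ∀ q, escSqlInner s fuel p q = (q ++ (s.drop p).flatMap pvDouble, s.length) := by
  intro fuel
  induction fuel with
  | zero => intro p hf; omega
  | succ fuel ih =>
      intro p hf h1 h2 hbody q
      rcases Nat.eq_or_lt_of_le h2 with rfl | hpl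
      · rw [escSqlInner, if_neg (by omega)]
        simp
      · rw [escSqlInner, if_pos hpl]
        have hdrop : s.drop p = s.getD p ' ' :: s.drop (p + 1) := by
          rw [List.drop_eq_getElem_cons hpl, List.getD_eq_getElem s ' ' hpl]
        by_cases hc : s.getD p ' ' = '\''
        · have hprev : s.getD (p - 1) ' ' = '\\' := hbody p le_rfl hpl hc
          rw [if_neg (by
            rintro ⟨-, h0 | hne⟩
            · omega
            · exact hne hprev)]
          rw [if_pos hc]
          rw [ih (p + 1) (by omega) (by omega) (by omega)
            (fun m hm1 hm2 => hbody m (by omega) hm2)]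
          rw [hdrop, List.flatMap_cons, hc]
          simp [pvDouble]
        · rw [if_neg (fun hh => hc hh.1), if_neg hc]
          rw [ih (p + 1) (by omega) (by omega) (by omega)
            (fun m hm1 hm2 => hbody m (by omega) hm2)]
          rw [hdrop, List.flatMap_cons]
          simp only [pvDouble]
          rw [if_neg hc]
          simp

-- the inner loop never moves its index backwards
theorem escSqlInner_ge (s : List Char) :
    ∀ fuel i r, i ≤ (escSqlInner s fuel i r).2 := by
  intro fuel
  induction fuel with
  | zero => intro i r; simp [escSqlInner]
  | succ fuel ih =>
      intro i r
      rw [escSqlInner]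
      by_cases hi : i < s.length
      · rw [if_pos hi]
        by_cases hc1 : s.getD i ' ' = '\'' ∧ (i = 0 ∨ s.getD (i - 1) ' ' ≠ '\\')
        · rw [if_pos hc1]
        · rw [if_neg hc1]
          by_cases hc2 : s.getD i ' ' = '\''
          · rw [if_pos hc2]; have := ih (i + 1) (r ++ ['\'', '\'']); omega
          · rw [if_neg hc2]; have := ih (i + 1) (r ++ [s.getD i ' ']); omega
      · rw [if_neg hi]

-- ---- fuel irrelevance of the two outer loops (any sufficient fuel gives the same value) ----

theorem escSqlOuter_fuel (s : List Char) :
    ∀ f1 f2 i r, s.length - i < f1 → s.length - i < f2 →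
      escSqlOuter s f1 i r = escSqlOuter s f2 i r := by
  intro f1
  induction f1 with
  | zero => intro f2 i r hf; omega
  | succ f1 ih =>
      intro f2 i r hf1 hf2
      cases f2 with
      | zero => omega
      | succ f2 =>
          rw [escSqlOuter, escSqlOuter]
          by_cases hi : i < s.length
          · rw [if_pos hi, if_pos hi]
            by_cases hq : s.getD i ' ' = '\''
            · rw [if_pos hq, if_pos hq]
              have hge := escSqlInner_ge s (s.length + 1) (i + 1) (r ++ [s.getD i ' '])
              exact ih f2 _ _ (by omega) (by omega)
            · rw [if_neg hq, if_neg hq]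
              exact ih f2 _ _ (by omega) (by omega)
          · rw [if_neg hi, if_neg hi]

theorem bMain_fuel (s : List Char) :
    ∀ f1 f2 i parts, s.length - i < f1 → s.length - i < f2 →
      bMain s f1 i parts = bMain s f2 i parts := by
  intro f1
  induction f1 with
  | zero => intro f2 i parts hf; omega
  | succ f1 ih =>
      intro f2 i parts hf1 hf2
      cases f2 with
      | zero => omega
      | succ f2 =>
          rw [bMain, bMain]
          rcases hfq : findQuote s (s.length + 1) i with _ | j
          · simp only [hfq]
          · simp only [hfq]
            have hjb := findQuote_bounds s (s.length + 1) i j hfq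
            rcases hbc : bFindClose s (s.length + 1) (j + 1) with _ | k
            · simp only [hbc]
            · simp only [hbc]
              have hkb := bFindClose_bounds s (s.length + 1) (j + 1) k hbc
              exact ih f2 _ _ (by omega) (by omega)

-- ---- A's outer loop over a quote-free region just copies it ----

theorem escSqlOuter_copy (s : List Char) :
    ∀ j, j ≤ s.length → ∀ i, i ≤ j →
      (∀ m, i ≤ m → m < j → s.getD m ' ' ≠ '\'') →
      ∀ fuel r, s.length - i < fuel →
        escSqlOuter s fuel i r =
          escSqlOuter s (fuel - (j - i)) j (r ++ (s.drop i).take (j - i)) := by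
  intro j hj
  have H : ∀ d i, j - i ≤ d → i ≤ j →
      (∀ m, i ≤ m → m < j → s.getD m ' ' ≠ '\'') →
      ∀ fuel r, s.length - i < fuel →
        escSqlOuter s fuel i r =
          escSqlOuter s (fuel - (j - i)) j (r ++ (s.drop i).take (j - i)) := by
    intro d
    induction d with
    | zero =>
        intro i hd hij _ fuel r _
        have : i = j := by omega
        subst this
        simp
    | succ d ih =>
        intro i hd hij hnq fuel r hfuel
        rcases Nat.eq_or_lt_of_le hij with rfl | hlt
        · simp
        · cases fuel with
          | zero => omega
          | succ fuel =>
              rw [escSqlOuter, if_pos (show i < s.length by omega),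
                if_neg (hnq i le_rfl hlt)]
              rw [ih (i + 1) (by omega) (by omega)
                (fun m hm1 hm2 => hnq m (by omega) hm2) fuel _ (by omega)]
              rw [slice_cons s i j hlt (by omega)]
              have : fuel + 1 - (j - i) = fuel - (j - (i + 1)) := by omega
              rw [this]
              simp
  intro i hij hnq fuel r hfuel
  exact H (j - i) i le_rfl hij hnq fuel r hfuel

-- ---- main equivalence of the two loop structures ----

theorem outer_eq_bMain (s : List Char) :
    ∀ d fuel i, s.length - i ≤ d → s.length - i < fuel → ∀ r,
      escSqlOuter s fuel i r = bMain s fuel i r := by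
  intro d
  induction d with
  | zero =>
      intro fuel i hd hfuel r
      cases fuel with
      | zero => omega
      | succ fuel =>
          rw [escSqlOuter, if_neg (by omega), bMain,
            findQuote_none_of_ge s (s.length + 1) i (by omega)]
          dsimp only
          rw [List.drop_eq_nil_of_le (by omega)]
          simp
  | succ d ih =>
      intro fuel i hd hfuel r
      cases fuel with
      | zero => omega
      | succ fuel =>
          by_cases hlt : i < s.length
          · rcases hfq : findQuote s (s.length + 1) i with _ | j
            · -- no quote anywhere from i: both sides copy the tail
              have hnq := findQuote_none_spec s (s.length + 1) i (by omega) hfq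
              rw [bMain]
              simp only [hfq]
              rw [escSqlOuter_copy s s.length le_rfl i (by omega)
                (fun m hm1 hm2 => hnq m hm1 hm2) (fuel + 1) r (by omega)]
              have hfe : s.length - s.length < fuel + 1 - (s.length - i) := by omega
              cases hfe2 : fuel + 1 - (s.length - i) with
              | zero => omega
              | succ f2 =>
                  rw [escSqlOuter, if_neg (by omega),
                    List.take_of_length_le (by simp)]
            · -- a quote at j: copy up to j, then the literal body up to its close (or the end)
              obtain ⟨hij, hjlen⟩ := findQuote_bounds s (s.length + 1) i j hfq
              obtain ⟨hjq, hnq⟩ := findQuote_some_spec s (s.length + 1) i j hfq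
              rw [escSqlOuter_copy s j (by omega) i hij
                (fun m hm1 hm2 => hnq m hm1 hm2) (fuel + 1) r (by omega)]
              have hacc : (r ++ (s.drop i).take (j - i)) ++ [s.getD j ' '] =
                  r ++ (s.drop i).take (j + 1 - i) := by
                rw [slice_snoc s i j hij hjlen]; simp
              cases hfe2 : fuel + 1 - (j - i) with
              | zero => omega
              | succ f2 =>
                  rw [escSqlOuter, if_pos hjlen, if_pos hjq]
                  rcases hbc : bFindClose s (s.length + 1) (j + 1) with _ | k
                  · -- unterminated literal
                    have hb := bFindClose_none_spec s (s.length + 1) (j + 1) (by omega) hbc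
                    rw [escSqlInner_open s (s.length + 1) (j + 1) (by omega) (by omega)
                      (by omega) (fun m hm1 hm2 => hb m hm1 hm2)]
                    dsimp only
                    rw [escSqlOuter_fuel s f2 1 (s.length + 1) _ (by omega) (by omega),
                      escSqlOuter, if_neg (by omega)]
                    rw [bMain]
                    simp only [hfq, hbc]
                    have hsafe := safe_slice s (j + 1) s.length (by omega)
                      (by rw [show j + 1 - 1 = j by omega]; exact hjq)
                      (fun m hm1 hm2 _ hm4 => hb m hm1 hm2 hm4)
                    rw [take_all_drop] at hsafe
                    rw [bEsc_eq_flatMap s (s.length + 1) _ (by simp; omega) hsafe, hacc]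
                  · -- closing quote at k
                    obtain ⟨hjk, hklen⟩ := bFindClose_bounds s (s.length + 1) (j + 1) k hbc
                    obtain ⟨hkq, hkp, hbody⟩ := bFindClose_some_spec s (s.length + 1) (j + 1) k hbc
                    rw [escSqlInner_close s k hklen hkq hkp (s.length + 1) (j + 1)
                      (by omega) (by omega) hjk hbody]
                    dsimp only
                    rw [escSqlOuter_fuel s f2 (fuel + 1) (k + 1) _ (by omega) (by omega)]
                    rw [bMain]
                    simp only [hfq, hbc]
                    rw [ih (fuel + 1) (k + 1) (by omega) (by omega)]
                    rw [bMain_fuel s (fuel + 1) fuel (k + 1) _ (by omega) (by omega)]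
                    have hsafe := safe_slice s (j + 1) (k - (j + 1)) (by omega)
                      (by rw [show j + 1 - 1 = j by omega]; exact hjq)
                      (fun m hm1 _ hm3 hm4 => hbody m hm1 (by omega) hm4)
                    rw [bEsc_eq_flatMap s (s.length + 1) _
                      (by simp [List.length_take, List.length_drop]; omega) hsafe, hacc]
                    simp
          · rw [escSqlOuter, if_neg hlt, bMain,
              findQuote_none_of_ge s (s.length + 1) i (by omega)]
            dsimp only
            rw [List.drop_eq_nil_of_le (by omega)]
            simp

-- ===== VERDICT (by name: the statement is the Claim_ definition above) =====
theorem escape_sql_string_values_spec : Claim_equal_escape_sql_string_values := by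
  intro v _
  unfold Spec_escape_sql_string_values escape_sql_string_values escape_sql_string_values_alt
  exact congrArg String.ofList
    (outer_eq_bMain v.toList v.toList.length (v.toList.length + 1) 0 (by omega) (by omega) [])
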